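-- pv_equiv track=rewrite | github.com/GBoshnakov/SoftUni-Advanced | Exams/24 October 2020/02.Checkmate.py | first_diagonal
-- ===== SOURCE A (Python) =====
-- SIZE = 8
--
-- def check_range(row, col, size=SIZE):
--     if 0 <= row < size and 0 <= col < size:
--         return True
--     return False
--
-- def first_diagonal(row, col, matrix):
--     check = []
--     for n in range(1, 8):
--         if check_range(row+n, col+n) and matrix[row+n][col+n] == "K":
--             check.append(True)
--             break
--         elif check_range(row+n, col+n) and matrix[row+n][col+n] == "Q":
--             check.append(False)
--             break
--     for n in range(-1, -8, -1):
--         if check_range(row+n, col+n) and matrix[row+n][col+n] == "K":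
--             check.append(True)
--             break
--         elif check_range(row+n, col+n) and matrix[row+n][col+n] == "Q":
--             check.append(False)
--             break
--     return any(check)
-- ===== SOURCE B (Python) =====
-- def _diag_beats(step, row, col, matrix):
--     # smallest distance to a K / to a Q along direction (step, step); 8 = "infinity"
--     dK = 8
--     dQ = 8
--     for n in range(1, 8):
--         r = row + step * n
--         c = col + step * n
--         if 0 <= r < 8 and 0 <= c < 8:
--             piece = matrix[r][c]
--             if piece == "K" and n < dK:
--                 dK = min(dK, n)
--             elif piece == "Q":
--                 dQ = min(dQ, n)
--     return dK < dQ
--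
-- def first_diagonal(row, col, matrix):
--     return _diag_beats(1, row, col, matrix) or _diag_beats(-1, row, col, matrix)
-- ===== Notes on version B (the rewrite author's own statement) =====
-- stated objective: alternative
-- what changed: Instead of A's early-break scan that appends booleans to a list, B walks each full diagonal once maintaining the distance to the nearest K and the minimum distance to a Q (8 = infinity) and reports a check iff dK < dQ on either diagonal.
-- outside the precondition, e.g. on first_diagonal(0, 0, [['x', 'x'], ['x', 'K']]): A returns True, B raises IndexError
import Mathlib
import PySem

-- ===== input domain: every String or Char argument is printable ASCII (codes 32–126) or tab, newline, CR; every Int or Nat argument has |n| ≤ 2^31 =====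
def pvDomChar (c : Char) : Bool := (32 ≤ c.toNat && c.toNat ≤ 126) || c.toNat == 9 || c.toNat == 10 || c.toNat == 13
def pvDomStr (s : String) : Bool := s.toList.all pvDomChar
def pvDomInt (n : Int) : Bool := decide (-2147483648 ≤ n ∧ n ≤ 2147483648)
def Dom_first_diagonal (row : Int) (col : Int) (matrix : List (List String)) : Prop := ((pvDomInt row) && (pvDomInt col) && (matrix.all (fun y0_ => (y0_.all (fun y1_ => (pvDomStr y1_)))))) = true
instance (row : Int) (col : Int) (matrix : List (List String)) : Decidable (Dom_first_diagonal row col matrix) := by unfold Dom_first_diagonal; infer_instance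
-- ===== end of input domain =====

-- B replaces A's early-break scan (appending booleans to a list) by one full pass per diagonal
-- maintaining nearest-K and nearest-Q distances (8 = infinity) and comparing them; return value only.

-- ===== PORT A =====
-- matrix[r][c] as an Option (none = IndexError); shared indexing helper for both ports
def pyCell (matrix : List (List String)) (r c : Int) : Option String :=
  (PySem.List.pyGet? matrix r).bind (fun rw => PySem.List.pyGet? rw c)

def check_range (row : Int) (col : Int) (size : Int) : Bool :=
  if 0 ≤ row ∧ row < size ∧ 0 ≤ col ∧ col < size then true else false

-- body of A's two identical for-loops (with break); called once per range
def firstLoopA (row col : Int) (matrix : List (List String)) : List Int → List Bool → List Bool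
  | [], check => check
  | n :: ns, check =>
    if check_range (row+n) (col+n) 8 && (pyCell matrix (row+n) (col+n) == some "K") then
      check ++ [true]
    else if check_range (row+n) (col+n) 8 && (pyCell matrix (row+n) (col+n) == some "Q") then
      check ++ [false]
    else firstLoopA row col matrix ns check

def first_diagonal (row : Int) (col : Int) (matrix : List (List String)) : Bool :=
  let check := firstLoopA row col matrix (PySem.List.pyRange 1 8 1) []
  let check := firstLoopA row col matrix (PySem.List.pyRange (-1) (-8) (-1)) check
  check.any id

-- ===== PORT B =====
-- one iteration of B's for-loop: state (dK, dQ)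
def bStep (step row col : Int) (matrix : List (List String)) (s : Int × Int) (n : Int) : Int × Int :=
  if 0 ≤ row + step * n ∧ row + step * n < 8 ∧ 0 ≤ col + step * n ∧ col + step * n < 8 then
    if pyCell matrix (row + step * n) (col + step * n) == some "K" ∧ n < s.1 then (min s.1 n, s.2)
    else if pyCell matrix (row + step * n) (col + step * n) == some "Q" then (s.1, min s.2 n)
    else s
  else s

def diagBeats (step row col : Int) (matrix : List (List String)) : Bool :=
  let st := (PySem.List.pyRange 1 8 1).foldl (bStep step row col matrix) (8, 8)
  decide (st.1 < st.2)

def first_diagonal_alt (row : Int) (col : Int) (matrix : List (List String)) : Bool :=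
  diagBeats 1 row col matrix || diagBeats (-1) row col matrix

-- ===== PRECONDITION & SPEC =====
-- Pre_ excludes ragged/short boards on which indexing a diagonal cell inside the 8×8 range
-- raises IndexError in Python; A may still return on a few of those when its break fires
-- before the bad cell, but B (which always scans the whole diagonal) raises there.
def Pre_first_diagonal (row : Int) (col : Int) (matrix : List (List String)) : Prop :=
  ∀ n ∈ ([1, 2, 3, 4, 5, 6, 7, -1, -2, -3, -4, -5, -6, -7] : List Int),
    (0 ≤ row + n ∧ row + n < 8 ∧ 0 ≤ col + n ∧ col + n < 8) →
      (row + n < (matrix.length : Int) ∧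
       col + n < ((((PySem.List.pyGet? matrix (row + n)).getD []).length : Int)))
instance (row : Int) (col : Int) (matrix : List (List String)) : Decidable (Pre_first_diagonal row col matrix) := by unfold Pre_first_diagonal; infer_instance

def pvWitness_first_diagonal : Int × Int × List (List String) :=
  (3, 3, [["x","x","x","x","x","x","x","x"],
          ["x","x","x","x","x","x","x","x"],
          ["x","x","x","x","x","x","x","x"],
          ["x","x","x","x","x","x","x","x"],
          ["x","x","x","x","K","x","x","x"],
          ["x","x","x","x","x","x","x","x"],
          ["x","x","x","x","x","x","x","x"],
          ["x","x","x","x","x","x","x","x"]])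

def Spec_first_diagonal (row : Int) (col : Int) (matrix : List (List String)) (out : Bool) : Prop := out = first_diagonal_alt row col matrix
instance (row : Int) (col : Int) (matrix : List (List String)) (out : Bool) : Decidable (Spec_first_diagonal row col matrix out) := by unfold Spec_first_diagonal; infer_instance

-- ===== CLAIM (what is proved, stated in full; the proofs are below) =====
def Claim_equal_first_diagonal : Prop := ∀ (row : Int) (col : Int) (matrix : List (List String)), Dom_first_diagonal row col matrix → Pre_first_diagonal row col matrix → Spec_first_diagonal row col matrix (first_diagonal row col matrix)

-- ===== LEMMAS AND PROOFS =====

-- what A's loop body decides about one cell: some true = K hit, some false = Q hit, none = skip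
def classify (matrix : List (List String)) (r c : Int) : Option Bool :=
  if check_range r c 8 && (pyCell matrix r c == some "K") then some true
  else if check_range r c 8 && (pyCell matrix r c == some "Q") then some false
  else none

def hitList : Option Bool → List Bool
  | some b => [b]
  | none => []

theorem firstLoopA_eq (row col : Int) (matrix : List (List String)) :
    ∀ (ns : List Int) (check : List Bool),
      firstLoopA row col matrix ns check =
        check ++ hitList (ns.findSome? (fun n => classify matrix (row+n) (col+n))) := by
  intro ns
  induction ns with
  | nil => intro check; simp [firstLoopA, hitList]
  | cons n ns ih =>
    intro check
    simp only [firstLoopA, List.findSome?, classify]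
    split_ifs with h1 h2 <;> simp [hitList, ih, classify]

-- B side, auxiliary: once a K has been recorded closer than everything still to come, the state is frozen
-- in first component and the second stays larger.
theorem foldB_K_won (step row col : Int) (matrix : List (List String)) :
    ∀ (ns : List Int) (k q : Int), (∀ n ∈ ns, k < n) → k < q →
      (ns.foldl (bStep step row col matrix) (k, q)).1 = k ∧
      k < (ns.foldl (bStep step row col matrix) (k, q)).2 := by
  intro ns
  induction ns with
  | nil => intro k q _ hkq; exact ⟨rfl, hkq⟩
  | cons n ns ih =>
    intro k q h hkq
    have hn : k < n := h n (by simp)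
    have hrest : ∀ m ∈ ns, k < m := fun m hm => h m (by simp [hm])
    simp only [List.foldl_cons]
    have hstep : bStep step row col matrix (k, q) n = (k, q) ∨
        bStep step row col matrix (k, q) n = (k, min q n) := by
      unfold bStep
      split
      · split
        · rename_i hc; exact absurd hc.2 (by omega)
        · split
          · exact Or.inr rfl
          · exact Or.inl rfl
      · exact Or.inl rfl
    rcases hstep with h1 | h1 <;> rw [h1]
    · exact ih k q hrest hkq
    · exact ih k (min q n) hrest (by omega)

-- once a Q has been recorded closer than everything still to come, the second component can only
-- shrink and the first stays larger.
theorem foldB_Q_won (step row col : Int) (matrix : List (List String)) :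
    ∀ (ns : List Int) (k q : Int), (∀ n ∈ ns, q < n) → q < k →
      (ns.foldl (bStep step row col matrix) (k, q)).2 ≤ q ∧
      q < (ns.foldl (bStep step row col matrix) (k, q)).1 := by
  intro ns
  induction ns with
  | nil => intro k q _ hqk; exact ⟨le_refl q, hqk⟩
  | cons n ns ih =>
    intro k q h hqk
    have hn : q < n := h n (by simp)
    have hrest : ∀ m ∈ ns, q < m := fun m hm => h m (by simp [hm])
    simp only [List.foldl_cons]
    have hstep : bStep step row col matrix (k, q) n = (k, q) ∨
        bStep step row col matrix (k, q) n = (min k n, q) := by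
      unfold bStep
      split
      · split
        · exact Or.inr rfl
        · split
          · rename_i hq; exact Or.inl (by simp; omega)
          · exact Or.inl rfl
      · exact Or.inl rfl
    rcases hstep with h1 | h1 <;> rw [h1]
    · exact ih k q hrest hqk
    · exact ih (min k n) q hrest (by omega)

-- relate one bStep to classify
theorem bStep_classify (step row col : Int) (matrix : List (List String)) (s : Int × Int) (n : Int) :
    bStep step row col matrix s n =
      match classify matrix (row + step * n) (col + step * n) with
      | some true => if n < s.1 then (min s.1 n, s.2) else s
      | some false => (s.1, min s.2 n)
      | none => s := by
  unfold bStep classify check_range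
  by_cases hin : 0 ≤ row + step * n ∧ row + step * n < 8 ∧ 0 ≤ col + step * n ∧ col + step * n < 8
  · by_cases hK : pyCell matrix (row + step * n) (col + step * n) = some "K"
    · simp [hin, hK]
    · by_cases hQ : pyCell matrix (row + step * n) (col + step * n) = some "Q"
      · simp [hin, hQ]
      · simp [hin, hK, hQ]
  · simp [hin]

-- main B-side invariant: while no piece has been seen (state still "infinite" relative to the
-- remaining distances), the final comparison says exactly "a K comes strictly before any Q".
theorem foldB_main (step row col : Int) (matrix : List (List String)) :
    ∀ (ns : List Int), ns.Pairwise (· < ·) →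
      ∀ (k q : Int), (∀ n ∈ ns, n < k ∧ n < q) → ¬ k < q →
      ((((ns.foldl (bStep step row col matrix) (k, q)).1 <
          (ns.foldl (bStep step row col matrix) (k, q)).2)) ↔
        ns.findSome? (fun n => classify matrix (row + step * n) (col + step * n)) = some true) := by
  intro ns
  induction ns with
  | nil =>
    intro _ k q _ hkq
    simp [List.findSome?]; omega
  | cons n ns ih =>
    intro hpw k q h hkq
    have hn := h n (by simp)
    have hrest : ∀ m ∈ ns, m < k ∧ m < q := fun m hm => h m (by simp [hm])
    have hord : ∀ m ∈ ns, n < m := (List.pairwise_cons.mp hpw).1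
    have hpw' := (List.pairwise_cons.mp hpw).2
    simp only [List.foldl_cons, List.findSome?, bStep_classify]
    rcases hcl : classify matrix (row + step * n) (col + step * n) with _ | b
    · simp only []
      rw [ih hpw' k q hrest hkq]
    · cases b
      · -- Q hit
        simp only []
        have := foldB_Q_won step row col matrix ns k (min q n)
          (by intro m hm; have := hord m hm; omega) (by omega)
        constructor
        · intro hlt; omega
        · intro hfs; simp at hfs
      · -- K hit
        simp only [if_pos hn.1]
        have hmin : min k n = n := by omega
        rw [hmin]
        have := foldB_K_won step row col matrix ns n q
          (by intro m hm; exact hord m hm) hn.2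
        simp only [this.1]
        constructor
        · intro _; simp
        · intro _; exact this.2

theorem pyRange17 : PySem.List.pyRange 1 8 1 = [1, 2, 3, 4, 5, 6, 7] := by decide
theorem pyRangeNeg : PySem.List.pyRange (-1) (-8) (-1) = [-1, -2, -3, -4, -5, -6, -7] := by decide

theorem diagBeats_pos (row col : Int) (matrix : List (List String)) :
    diagBeats 1 row col matrix =
      (([1, 2, 3, 4, 5, 6, 7] : List Int).findSome?
        (fun n => classify matrix (row + n) (col + n)) == some true) := by
  unfold diagBeats
  rw [pyRange17]
  have hmain := foldB_main 1 row col matrix [1, 2, 3, 4, 5, 6, 7] (by decide) 8 8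
    (by decide) (by decide)
  have hfun : (fun n => classify matrix (row + 1 * n) (col + 1 * n)) =
      (fun n => classify matrix (row + n) (col + n)) := by
    funext n; rw [one_mul]
  rw [hfun] at hmain
  rcases hfs : ([1, 2, 3, 4, 5, 6, 7] : List Int).findSome?
      (fun n => classify matrix (row + n) (col + n)) with _ | b
  · simp only [hfs] at hmain; simp at hmain ⊢; omega
  · cases b
    · simp only [hfs] at hmain; simp at hmain ⊢; omega
    · simp only [hfs] at hmain; simp at hmain ⊢; omega

theorem diagBeats_neg (row col : Int) (matrix : List (List String)) :
    diagBeats (-1) row col matrix =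
      (([-1, -2, -3, -4, -5, -6, -7] : List Int).findSome?
        (fun n => classify matrix (row + n) (col + n)) == some true) := by
  unfold diagBeats
  rw [pyRange17]
  have hmain := foldB_main (-1) row col matrix [1, 2, 3, 4, 5, 6, 7] (by decide) 8 8
    (by decide) (by decide)
  have hlists : (([1, 2, 3, 4, 5, 6, 7] : List Int).findSome?
      (fun n => classify matrix (row + (-1) * n) (col + (-1) * n))) =
      (([-1, -2, -3, -4, -5, -6, -7] : List Int).findSome?
      (fun n => classify matrix (row + n) (col + n))) := by
    simp only [List.findSome?]
    norm_num
  rw [hlists] at hmain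
  rcases hfs : ([-1, -2, -3, -4, -5, -6, -7] : List Int).findSome?
      (fun n => classify matrix (row + n) (col + n)) with _ | b
  · simp only [hfs] at hmain; simp at hmain ⊢; omega
  · cases b
    · simp only [hfs] at hmain; simp at hmain ⊢; omega
    · simp only [hfs] at hmain; simp at hmain ⊢; omega

theorem any_hitList (o : Option Bool) : (hitList o).any id = (o == some true) := by
  rcases o with _ | b
  · simp [hitList]
  · cases b <;> simp [hitList]

-- ===== VERDICT (by name: the statement is the Claim_ definition above) =====
theorem first_diagonal_spec : Claim_equal_first_diagonal := by
  intro row col matrix _ _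
  unfold Spec_first_diagonal first_diagonal first_diagonal_alt
  simp only [pyRange17, pyRangeNeg, firstLoopA_eq, diagBeats_pos, diagBeats_neg,
    List.nil_append, List.any_append, any_hitList]
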